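-- pv_equiv track=rewrite | github.com/dinipanjaitan017-png/algoritma-pemrograman-1D-2025 | modul-6/remed/tugas02.py | gabung_dan_urutkan
-- ===== SOURCE A (Python) =====
-- def gabung_dan_urutkan(t1, t2):
--     gabungan = t1 + t2
--
--     unik = ()
--     for angka in gabungan:
--         sudah_ada = False
--         for u in unik:
--             if angka == u:
--                 sudah_ada = True
--                 break
--         if not sudah_ada:
--             unik = unik + (angka,)
--
--     unik = list(unik)
--     n = len(unik)
--     for i in range(n - 1):
--         for j in range(i + 1, n):
--             if unik[i] < unik[j]:
--                 temp = unik[i]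
--                 unik[i] = unik[j]
--                 unik[j] = temp
--
--     hasil = ()
--     for angka in unik:
--         hasil = hasil + (angka,)
--
--     return hasil
-- ===== SOURCE B (Python) =====
-- def gabung_dan_urutkan(t1, t2):
--     hasil = ()
--     for x in sorted(t1 + t2, reverse=True):
--         if not hasil or hasil[-1] != x:
--             hasil = hasil + (x,)
--     return hasil
-- ===== Notes on version B (the rewrite author's own statement) =====
-- stated objective: faster
-- what changed: A dedupes with a nested membership scan and then sorts with a quadratic swap-based selection loop; B sorts the concatenation once and removes the now-adjacent duplicates in a single linear pass.
import Mathlib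
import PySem

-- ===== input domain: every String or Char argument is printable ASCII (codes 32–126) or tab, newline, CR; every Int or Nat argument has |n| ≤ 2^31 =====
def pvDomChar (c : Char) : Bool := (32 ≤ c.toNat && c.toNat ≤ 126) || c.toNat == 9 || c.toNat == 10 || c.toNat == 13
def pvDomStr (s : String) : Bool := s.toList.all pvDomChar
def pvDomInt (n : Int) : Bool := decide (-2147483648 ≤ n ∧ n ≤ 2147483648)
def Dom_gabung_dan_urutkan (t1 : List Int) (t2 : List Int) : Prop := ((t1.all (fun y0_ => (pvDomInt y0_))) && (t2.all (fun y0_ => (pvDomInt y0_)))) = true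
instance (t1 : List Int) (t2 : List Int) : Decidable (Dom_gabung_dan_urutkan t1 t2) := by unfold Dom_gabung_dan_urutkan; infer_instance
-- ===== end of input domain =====

-- B sorts the concatenation once and drops now-adjacent duplicates in one pass,
-- replacing A's nested membership-dedup and quadratic swap sort (faster in a timing run).


-- ===== PORT A =====
-- inner 'for u in unik: if angka == u: sudah_ada = True; break'
def adaDi (angka : Int) : List Int → Bool
  | [] => false
  | u :: rest => if angka = u then true else adaDi angka rest

-- first loop: membership-checked dedup building the tuple 'unik'
def dedupA (gabungan : List Int) : List Int :=
  gabungan.foldl (fun unik angka => if adaDi angka unik then unik else unik ++ [angka]) []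

-- nested index loops: swap-based descending selection sort
def sortA (unik : List Int) : List Int :=
  let n : Int := unik.length
  (PySem.List.pyRange 0 (n - 1) 1).foldl (fun a i =>
    (PySem.List.pyRange (i + 1) n 1).foldl (fun a j =>
      if PySem.List.pyGetD a i 0 < PySem.List.pyGetD a j 0 then
        let temp := PySem.List.pyGetD a i 0
        PySem.List.pySetD (PySem.List.pySetD a i (PySem.List.pyGetD a j 0)) j temp
      else a) a) unik

def gabung_dan_urutkan (t1 : List Int) (t2 : List Int) : List Int :=
  let gabungan := t1 ++ t2
  let unik := sortA (dedupA gabungan)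
  -- final loop rebuilding the tuple 'hasil'
  unik.foldl (fun hasil angka => hasil ++ [angka]) []

-- ===== PORT B =====
def gabung_dan_urutkan_alt (t1 : List Int) (t2 : List Int) : List Int :=
  (PySem.List.sorted (t1 ++ t2) (fun x => x) true).foldl
    (fun hasil x =>
      if hasil = [] ∨ PySem.List.pyGetD hasil (-1) 0 ≠ x then hasil ++ [x] else hasil) []

-- ===== PRECONDITION & SPEC =====
def Spec_gabung_dan_urutkan (t1 : List Int) (t2 : List Int) (out : List Int) : Prop := out = gabung_dan_urutkan_alt t1 t2
instance (t1 : List Int) (t2 : List Int) (out : List Int) : Decidable (Spec_gabung_dan_urutkan t1 t2 out) := by unfold Spec_gabung_dan_urutkan; infer_instance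

-- ===== CLAIM (what is proved, stated in full; the proofs are below) =====
def Claim_equal_gabung_dan_urutkan : Prop := ∀ (t1 : List Int) (t2 : List Int), Dom_gabung_dan_urutkan t1 t2 → Spec_gabung_dan_urutkan t1 t2 (gabung_dan_urutkan t1 t2)

-- ===== LEMMAS AND PROOFS =====

-- ---- generic Nat-indexed iteration shadowing a foldl over pyRange _ _ 1 ----
def natIter (f : List Int → Nat → List Int) (x : List Int) (s : Nat) : Nat → List Int
  | 0 => x
  | c + 1 => natIter f (f x s) (s + 1) c

lemma pyfold_natIter (f : List Int → Int → List Int) (fN : List Int → Nat → List Int)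
    (hf : ∀ a (k : Nat), f a (k : Int) = fN a k) :
    ∀ (c s : Nat) (x : List Int),
      (PySem.List.pyRange (s : Int) ((s : Int) + (c : Int)) 1).foldl f x = natIter fN x s c := by
  intro c
  induction c with
  | zero => intro s x; simp [PySem.List.pyRange_one_eq_nil, natIter]
  | succ c ih =>
    intro s x
    rw [PySem.List.pyRange_one_cons (by push_cast; omega), List.foldl_cons, hf]
    have h3 : ((s : Int) + ((c + 1 : Nat) : Int)) = (((s + 1 : Nat) : Int) + (c : Int)) := by
      push_cast; ring
    have h2 : ((s : Int) + 1 : Int) = ((s + 1 : Nat) : Int) := by push_cast; ring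
    rw [h3, h2, ih]
    rfl

-- ---- the swap step at Nat indices ----
def stepN (a : List Int) (i j : Nat) : List Int :=
  if a.getD i 0 < a.getD j 0 then (a.set i (a.getD j 0)).set j (a.getD i 0) else a

def innerN (a : List Int) (i s c : Nat) : List Int := natIter (fun a j => stepN a i j) a s c

def outerBody (n : Nat) (a : List Int) (i : Nat) : List Int := innerN a i (i + 1) (n - (i + 1))

-- swap is a permutation
lemma getD_cons_set_perm : ∀ (t : List Int) (k : Nat) (x : Int), k < t.length →
    (t.getD k 0 :: t.set k x).Perm (x :: t) := by
  intro t
  induction t with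
  | nil => intro k x hk; simp at hk
  | cons y s ih =>
    intro k x hk
    cases k with
    | zero => simpa using List.Perm.swap x y s
    | succ k =>
      simp only [List.getD_cons_succ, List.set_cons_succ]
      exact ((List.Perm.swap y (s.getD k 0) (s.set k x)).trans
        ((ih k x (by simpa using hk)).cons y)).trans (List.Perm.swap x y s)

lemma set_set_perm (l : List Int) (i j : Nat) (hij : i < j) (hj : j < l.length) :
    ((l.set i (l.getD j 0)).set j (l.getD i 0)).Perm l := by
  induction l generalizing i j with
  | nil => simp at hj
  | cons y s ih =>
    cases i with
    | zero =>
      cases j with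
      | zero => omega
      | succ j =>
        simp only [List.getD_cons_succ, List.getD_cons_zero, List.set_cons_zero,
          List.set_cons_succ]
        exact getD_cons_set_perm s j y (by simpa using hj)
    | succ i =>
      cases j with
      | zero => omega
      | succ j =>
        simp only [List.getD_cons_succ, List.set_cons_succ]
        exact (ih i j (by omega) (by simpa using hj)).cons y

lemma length_stepN (a : List Int) (i j : Nat) : (stepN a i j).length = a.length := by
  unfold stepN; split <;> simp

lemma stepN_perm (a : List Int) (i j : Nat) (hij : i < j) (hj : j < a.length) :
    (stepN a i j).Perm a := by
  unfold stepN; split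
  · exact set_set_perm a i j hij hj
  · exact List.Perm.refl a

lemma getElem?_stepN_ne (a : List Int) (i j k : Nat) (hki : k ≠ i) (hkj : k ≠ j) :
    (stepN a i j)[k]? = a[k]? := by
  unfold stepN; split
  · rw [List.getElem?_set_ne hkj.symm, List.getElem?_set_ne hki.symm]
  · rfl

lemma getD_set_self (l : List Int) (i : Nat) (v : Int) (h : i < l.length) :
    (l.set i v).getD i 0 = v := by
  simp [List.getD_eq_getElem?_getD, List.getElem?_set_self', List.getElem?_eq_getElem h]

lemma getD_set_ne (l : List Int) (i k : Nat) (v : Int) (h : k ≠ i) :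
    (l.set i v).getD k 0 = l.getD k 0 := by
  simp [List.getD_eq_getElem?_getD, List.getElem?_set_ne h.symm]

lemma length_innerN : ∀ (c s : Nat) (a : List Int) (i : Nat), (innerN a i s c).length = a.length := by
  intro c
  induction c with
  | zero => intro s a i; rfl
  | succ c ih =>
    intro s a i
    show (innerN (stepN a i s) i (s + 1) c).length = a.length
    rw [ih, length_stepN]

lemma innerN_perm : ∀ (c s : Nat) (a : List Int) (i : Nat), i < s → s + c ≤ a.length →
    (innerN a i s c).Perm a := by
  intro c
  induction c with
  | zero => exact fun s a i _ _ => List.Perm.refl a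
  | succ c ih =>
    intro s a i h1 h2
    have hlen := length_stepN a i s
    exact ((ih (s + 1) (stepN a i s) i (by omega) (by omega)).trans
      (stepN_perm a i s h1 (by omega)))

lemma getElem?_innerN_lt : ∀ (c s : Nat) (a : List Int) (i k : Nat), k < s → k ≠ i →
    (innerN a i s c)[k]? = a[k]? := by
  intro c
  induction c with
  | zero => exact fun _ _ _ _ _ _ => rfl
  | succ c ih =>
    intro s a i k hks hki
    show (innerN (stepN a i s) i (s + 1) c)[k]? = a[k]?
    rw [ih (s + 1) (stepN a i s) i k (by omega) hki]
    exact getElem?_stepN_ne a i s k hki (by omega)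

lemma innerN_max : ∀ (c s : Nat) (a : List Int) (i : Nat), i < s → s + c = a.length →
    (∀ k, i < k → k < s → a.getD k 0 ≤ a.getD i 0) →
    ∀ k, i < k → k < a.length → (innerN a i s c).getD k 0 ≤ (innerN a i s c).getD i 0 := by
  intro c
  induction c with
  | zero =>
    intro s a i h1 h2 hpre k hik hk
    exact hpre k hik (by omega)
  | succ c ih =>
    intro s a i h1 h2 hpre k hik hk
    have hi : i < a.length := by omega
    have hs : s < a.length := by omega
    have hlen := length_stepN a i s
    have hpre' : ∀ k, i < k → k < s + 1 → (stepN a i s).getD k 0 ≤ (stepN a i s).getD i 0 := by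
      intro k hik hks
      unfold stepN
      split
      · rename_i hcond
        have ei : ((a.set i (a.getD s 0)).set s (a.getD i 0)).getD i 0 = a.getD s 0 := by
          rw [getD_set_ne (a.set i (a.getD s 0)) s i _ (by omega), getD_set_self a i _ hi]
        by_cases hkseq : k = s
        · subst hkseq
          have ek : ((a.set i (a.getD k 0)).set k (a.getD i 0)).getD k 0 = a.getD i 0 :=
            getD_set_self _ k _ (by simpa using hs)
          rw [ei, ek]
          omega
        · have ek : ((a.set i (a.getD s 0)).set s (a.getD i 0)).getD k 0 = a.getD k 0 := by
            rw [getD_set_ne (a.set i (a.getD s 0)) s k _ hkseq,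
              getD_set_ne a i k _ (by omega)]
          rw [ei, ek]
          have := hpre k hik (by omega)
          omega
      · rename_i hcond
        by_cases hkseq : k = s
        · subst hkseq; omega
        · exact hpre k hik (by omega)
    show (innerN (stepN a i s) i (s + 1) c).getD k 0 ≤ (innerN (stepN a i s) i (s + 1) c).getD i 0
    exact ih (s + 1) (stepN a i s) i (by omega) (by omega) hpre' k hik (by omega)

lemma length_outer (n : Nat) : ∀ (c i : Nat) (a : List Int),
    (natIter (outerBody n) a i c).length = a.length := by
  intro c
  induction c with
  | zero => exact fun i a => rfl
  | succ c ih =>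
    intro i a
    show (natIter (outerBody n) (outerBody n a i) (i + 1) c).length = a.length
    rw [ih]
    exact length_innerN _ _ _ _

lemma outer_perm (n : Nat) : ∀ (c i : Nat) (a : List Int), a.length = n → i + c ≤ n →
    (natIter (outerBody n) a i c).Perm a := by
  intro c
  induction c with
  | zero => exact fun i a _ _ => List.Perm.refl a
  | succ c ih =>
    intro i a hlen hcnt
    have hinner : (outerBody n a i).Perm a :=
      innerN_perm _ _ _ _ (by omega) (by rw [hlen]; omega)
    have hlen2 : (outerBody n a i).length = a.length := length_innerN _ _ _ _
    exact (ih (i + 1) (outerBody n a i) (by omega) (by omega)).trans hinner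

lemma outer_sorted (n : Nat) : ∀ (c i : Nat) (a : List Int), a.length = n → i + c + 1 = n →
    (∀ p q, p < i → p < q → q < n → a.getD q 0 ≤ a.getD p 0) →
    ∀ p q, p < q → q < n →
      (natIter (outerBody n) a i c).getD q 0 ≤ (natIter (outerBody n) a i c).getD p 0 := by
  intro c
  induction c with
  | zero =>
    intro i a hlen hni hpre p q hpq hq
    exact hpre p q (by omega) hpq hq
  | succ c ih =>
    intro i a hlen hni hpre p q hpq hq
    have hlen' : (outerBody n a i).length = a.length := length_innerN _ _ _ _
    have hperm : (outerBody n a i).Perm a :=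
      innerN_perm _ _ _ _ (by omega) (by rw [hlen]; omega)
    have hframe : ∀ k, k < i → (outerBody n a i)[k]? = a[k]? := by
      intro k hk
      exact getElem?_innerN_lt _ _ _ _ _ (by omega) (by omega)
    have hsuffix : ∀ q, i ≤ q → q < n →
        ∃ r, i ≤ r ∧ r < n ∧ (outerBody n a i).getD q 0 = a.getD r 0 := by
      intro q hiq hqn
      have htake : (outerBody n a i).take i = a.take i := by
        apply List.ext_getElem?
        intro k
        by_cases hk : k < i
        · rw [List.getElem?_take_of_lt hk, List.getElem?_take_of_lt hk, hframe k hk]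
        · rw [List.getElem?_eq_none (by simp; omega), List.getElem?_eq_none (by simp; omega)]
      have hdropperm : ((outerBody n a i).drop i).Perm (a.drop i) := by
        have h1 := List.take_append_drop i (outerBody n a i)
        have h2 := List.take_append_drop i a
        have e1 : outerBody n a i = a.take i ++ (outerBody n a i).drop i := by
          conv_lhs => rw [← h1]
          rw [htake]
        apply (List.perm_append_left_iff (a.take i)).mp
        rw [← e1, h2]
        exact hperm
      have hq1 : q < (outerBody n a i).length := by omega
      have hq2 : q - i < ((outerBody n a i).drop i).length := by
        rw [List.length_drop]; omega
      have hx : (outerBody n a i).getD q 0 ∈ (outerBody n a i).drop i := by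
        have : ((outerBody n a i).drop i)[q - i] = (outerBody n a i)[q]'hq1 := by
          have h3 : ((outerBody n a i).drop i)[q - i]? = (outerBody n a i)[i + (q - i)]? :=
            List.getElem?_drop
          rw [List.getElem?_eq_getElem hq2, show i + (q - i) = q by omega,
            List.getElem?_eq_getElem hq1] at h3
          exact Option.some_injective _ h3
        rw [List.getD_eq_getElem _ 0 hq1, ← this]
        exact List.getElem_mem hq2
      have hx2 : (outerBody n a i).getD q 0 ∈ a.drop i := hdropperm.mem_iff.mp hx
      obtain ⟨j, hj⟩ := List.mem_iff_getElem?.mp hx2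
      have hj1 : j < (a.drop i).length := by
        by_contra hcon
        rw [List.getElem?_eq_none (by omega)] at hj
        simp at hj
      rw [List.getElem?_drop, List.getElem?_eq_getElem (by
        rw [List.length_drop] at hj1; omega : i + j < a.length)] at hj
      refine ⟨i + j, by omega, by rw [List.length_drop] at hj1; omega, ?_⟩
      rw [List.getD_eq_getElem a 0 (by rw [List.length_drop] at hj1; omega : i + j < a.length)]
      exact Option.some_injective _ hj.symm
    have hkey : ∀ k, i < k → k < n →
        (outerBody n a i).getD k 0 ≤ (outerBody n a i).getD i 0 := by
      intro k hik hkn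
      exact innerN_max _ _ _ _ (by omega) (by omega) (by intro k h1 h2; omega) k hik (by omega)
    have hframeD : ∀ k, k < i → (outerBody n a i).getD k 0 = a.getD k 0 := by
      intro k hk
      rw [List.getD_eq_getElem?_getD, List.getD_eq_getElem?_getD, hframe k hk]
    have hpre' : ∀ p q, p < i + 1 → p < q → q < n →
        (outerBody n a i).getD q 0 ≤ (outerBody n a i).getD p 0 := by
      intro p q hp hpq hqn
      by_cases hpi : p = i
      · subst hpi
        exact hkey q hpq hqn
      · have hpilt : p < i := by omega
        rw [hframeD p hpilt]
        by_cases hqi : q < i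
        · rw [hframeD q hqi]
          exact hpre p q hpilt hpq hqn
        · obtain ⟨r, hir, hrn, hval⟩ := hsuffix q (by omega) hqn
          rw [hval]
          exact hpre p r hpilt (by omega) hrn
    exact ih (i + 1) (outerBody n a i) (by omega) (by omega) hpre' p q hpq hq

-- ---- sortA = the Nat-level loops; its output is a descending-sorted permutation ----
lemma sortA_eq (unik : List Int) :
    sortA unik = natIter (outerBody unik.length) unik 0 (unik.length - 1) := by
  have hg : ∀ (k : Nat) (a : List Int) (j : Nat),
      (if PySem.List.pyGetD a (k : Int) 0 < PySem.List.pyGetD a (j : Int) 0 then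
          PySem.List.pySetD (PySem.List.pySetD a (k : Int) (PySem.List.pyGetD a (j : Int) 0))
            (j : Int) (PySem.List.pyGetD a (k : Int) 0)
        else a) = stepN a k j := by
    intro k a j
    simp [stepN, PySem.List.pyGetD_natCast, PySem.List.pySetD_natCast]
  have hf : ∀ (a : List Int) (k : Nat),
      (PySem.List.pyRange ((k : Int) + 1) (unik.length : Int) 1).foldl
        (fun a j => if PySem.List.pyGetD a (k : Int) 0 < PySem.List.pyGetD a j 0 then
            let temp := PySem.List.pyGetD a (k : Int) 0
            PySem.List.pySetD (PySem.List.pySetD a (k : Int) (PySem.List.pyGetD a j 0)) j temp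
          else a) a = outerBody unik.length a k := by
    intro a k
    by_cases hk : k + 1 ≤ unik.length
    · have hcast : ((k : Int) + 1) = ((k + 1 : Nat) : Int) := by omega
      have hcast2 : ((unik.length : Int))
          = (((k + 1 : Nat)) : Int) + ((unik.length - (k + 1) : Nat) : Int) := by
        push_cast; omega
      rw [hcast, hcast2, pyfold_natIter _ _ (hg k)]
      rfl
    · rw [PySem.List.pyRange_one_eq_nil (by omega)]
      unfold outerBody innerN
      rw [show unik.length - (k + 1) = 0 by omega]
      rfl
  unfold sortA
  by_cases hn0 : unik.length = 0
  · rw [List.eq_nil_of_length_eq_zero hn0]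
    rfl
  · have hcast : ((unik.length : Int) - 1)
        = ((0 : Nat) : Int) + ((unik.length - 1 : Nat) : Int) := by push_cast; omega
    show (PySem.List.pyRange 0 ((unik.length : Int) - 1) 1).foldl _ unik = _
    rw [show (0 : Int) = ((0 : Nat) : Int) from rfl, hcast]
    exact pyfold_natIter _ _ hf (unik.length - 1) 0 unik

lemma sortA_perm (unik : List Int) : (sortA unik).Perm unik := by
  rw [sortA_eq]
  exact outer_perm unik.length (unik.length - 1) 0 unik rfl (by omega)

lemma sortA_sorted (unik : List Int) : (sortA unik).Pairwise (fun x y => y ≤ x) := by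
  by_cases hn0 : unik.length = 0
  · rw [List.eq_nil_of_length_eq_zero hn0]
    simp [sortA]
  · rw [sortA_eq]
    have hlen : (natIter (outerBody unik.length) unik 0 (unik.length - 1)).length
        = unik.length := length_outer _ _ _ _
    have hs := outer_sorted unik.length (unik.length - 1) 0 unik rfl (by omega)
      (by intro p q hp _ _; omega)
    rw [List.pairwise_iff_getElem]
    intro p q hp hq hpq
    have := hs p q hpq (by omega)
    rwa [List.getD_eq_getElem _ 0 hq, List.getD_eq_getElem _ 0 hp] at this

-- ---- the dedup loop of A ----
lemma adaDi_eq (x : Int) (l : List Int) : adaDi x l = decide (x ∈ l) := by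
  induction l with
  | nil => rfl
  | cons u rest ih => by_cases h : x = u <;> simp [adaDi, h, ih]

lemma dedupA_nodup_mem : ∀ (g u : List Int), u.Nodup →
    (g.foldl (fun unik angka => if adaDi angka unik then unik else unik ++ [angka]) u).Nodup ∧
    ∀ y, y ∈ g.foldl (fun unik angka => if adaDi angka unik then unik else unik ++ [angka]) u ↔
      (y ∈ u ∨ y ∈ g) := by
  intro g
  induction g with
  | nil => exact fun u hu => ⟨hu, fun y => by simp⟩
  | cons x g ih =>
    intro u hu
    rw [List.foldl_cons]
    by_cases hx : x ∈ u
    · rw [show (if adaDi x u then u else u ++ [x]) = u by rw [adaDi_eq]; simp [hx]]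
      obtain ⟨h1, h2⟩ := ih u hu
      refine ⟨h1, fun y => (h2 y).trans ?_⟩
      constructor
      · rintro (h | h)
        · exact Or.inl h
        · exact Or.inr (List.mem_cons_of_mem x h)
      · rintro (h | h)
        · exact Or.inl h
        · rcases List.mem_cons.mp h with h | h
          · exact Or.inl (h ▸ hx)
          · exact Or.inr h
    · rw [show (if adaDi x u then u else u ++ [x]) = u ++ [x] by rw [adaDi_eq]; simp [hx]]
      obtain ⟨h1, h2⟩ := ih (u ++ [x]) (by simp [List.nodup_append, hu]; exact fun a ha h => hx (h ▸ ha))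
      refine ⟨h1, fun y => (h2 y).trans ?_⟩
      simp [or_assoc]

-- ---- the adjacent-dedup loop of B ----
lemma last_le_of_pairwise_gt : ∀ (r : List Int) (z : Int), r.Pairwise (· > ·) →
    r.getLast? = some z → ∀ w ∈ r, z ≤ w := by
  intro r
  induction r with
  | nil => simp
  | cons v r ih =>
    intro z hp hz w hw
    rcases List.pairwise_cons.mp hp with ⟨hv, hr⟩
    cases hrn : r with
    | nil =>
      subst hrn
      simp at hz hw
      omega
    | cons v' r' =>
      subst hrn
      rw [List.getLast?_cons_cons] at hz
      rcases List.mem_cons.mp hw with h | h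
      · subst h
        exact le_of_lt (hv z (List.mem_of_getLast? hz))
      · exact ih z hr hz w h

lemma dedupB_inv : ∀ (l r : List Int), l.Pairwise (fun a b => b ≤ a) → r.Pairwise (· > ·) →
    (∀ y ∈ l, ∀ z, r.getLast? = some z → y ≤ z) →
    (l.foldl (fun hasil x =>
      if hasil = [] ∨ PySem.List.pyGetD hasil (-1) 0 ≠ x then hasil ++ [x] else hasil) r).Pairwise (· > ·) ∧
    ∀ y, y ∈ l.foldl (fun hasil x =>
      if hasil = [] ∨ PySem.List.pyGetD hasil (-1) 0 ≠ x then hasil ++ [x] else hasil) r ↔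
      (y ∈ r ∨ y ∈ l) := by
  intro l
  induction l with
  | nil => exact fun r _ hr _ => ⟨hr, fun y => by simp⟩
  | cons x l ih =>
    intro r hl hr hlink
    rcases List.pairwise_cons.mp hl with ⟨hxge, hl'⟩
    rw [List.foldl_cons]
    rcases hre : r with _ | ⟨v, r'⟩
    · rw [if_pos (Or.inl rfl)]
      obtain ⟨h1, h2⟩ := ih [x] hl' (by simp) (by
        intro y hy z hz
        simp at hz
        subst hz
        exact hxge y hy)
      refine ⟨h1, fun y => (h2 y).trans (by simp)⟩
    · rw [← hre]
      have hrne : r ≠ [] := by rw [hre]; simp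
      have hlast : PySem.List.pyGetD r (-1) 0 = r.getLast hrne := PySem.List.pyGetD_neg_one r 0 hrne
      have hlast? : r.getLast? = some (r.getLast hrne) := List.getLast?_eq_some_getLast hrne
      by_cases hzx : r.getLast hrne = x
      · rw [if_neg (by
          rintro (h | h)
          · exact hrne h
          · exact h (by rw [hlast]; exact hzx))]
        obtain ⟨h1, h2⟩ := ih r hl' hr (by
          intro y hy z hz
          rw [hlast?] at hz
          obtain rfl : r.getLast hrne = z := Option.some_injective _ hz
          exact hlink y (List.mem_cons_of_mem x hy) _ hlast?)
        refine ⟨h1, fun y => (h2 y).trans ?_⟩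
        have hxr : x ∈ r := hzx ▸ List.mem_of_getLast? hlast?
        constructor
        · rintro (h | h)
          · exact Or.inl h
          · exact Or.inr (List.mem_cons_of_mem x h)
        · rintro (h | h)
          · exact Or.inl h
          · rcases List.mem_cons.mp h with h | h
            · exact Or.inl (h ▸ hxr)
            · exact Or.inr h
      · rw [if_pos (Or.inr (by rw [hlast]; exact hzx))]
        have hxlt : x < r.getLast hrne := by
          have := hlink x (List.mem_cons_self) (r.getLast hrne) hlast?
          omega
        have hr' : (r ++ [x]).Pairwise (· > ·) := by
          rw [List.pairwise_append]
          refine ⟨hr, by simp, ?_⟩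
          intro a ha b hb
          rcases List.mem_singleton.mp hb with rfl
          have := last_le_of_pairwise_gt r (r.getLast hrne) hr hlast? a ha
          omega
        obtain ⟨h1, h2⟩ := ih (r ++ [x]) hl' hr' (by
          intro y hy z hz
          rw [List.getLast?_concat] at hz
          obtain rfl : x = z := Option.some_injective _ hz
          exact hxge y hy)
        refine ⟨h1, fun y => (h2 y).trans (by simp [or_assoc])⟩

-- ===== VERDICT (by name: the statement is the Claim_ definition above) =====
theorem gabung_dan_urutkan_spec : Claim_equal_gabung_dan_urutkan := by
  intro t1 t2 _
  unfold Spec_gabung_dan_urutkan gabung_dan_urutkan gabung_dan_urutkan_alt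
  show (sortA (dedupA (t1 ++ t2))).foldl (fun hasil angka => hasil ++ [angka]) [] = _
  rw [PySem.List.foldl_append_singleton, List.nil_append]
  obtain ⟨hDnodup, hDmem⟩ := dedupA_nodup_mem (t1 ++ t2) [] List.nodup_nil
  rw [show List.foldl (fun unik angka => if adaDi angka unik = true then unik else unik ++ [angka])
      [] (t1 ++ t2) = dedupA (t1 ++ t2) from rfl] at hDnodup hDmem
  have hAperm := sortA_perm (dedupA (t1 ++ t2))
  have hAnodup : (sortA (dedupA (t1 ++ t2))).Nodup := hAperm.nodup_iff.mpr hDnodup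
  have hAmem : ∀ y, y ∈ sortA (dedupA (t1 ++ t2)) ↔ y ∈ t1 ++ t2 := by
    intro y
    rw [hAperm.mem_iff, hDmem y]
    simp
  have hAsorted := sortA_sorted (dedupA (t1 ++ t2))
  obtain ⟨hBgt, hBmem'⟩ := dedupB_inv (PySem.List.sorted (t1 ++ t2) (fun x => x) true) []
    (PySem.List.sorted_pairwise_rev (t1 ++ t2) (fun x => x)) (by simp) (by simp)
  have hBmem : ∀ y, y ∈ (PySem.List.sorted (t1 ++ t2) (fun x => x) true).foldl
      (fun hasil x =>
        if hasil = [] ∨ PySem.List.pyGetD hasil (-1) 0 ≠ x then hasil ++ [x] else hasil) [] ↔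
      y ∈ t1 ++ t2 := by
    intro y
    rw [hBmem' y, PySem.List.mem_sorted]
    simp
  have hBnodup := hBgt.imp (fun h => ne_of_gt h)
  have hBsorted := hBgt.imp (fun {a b} h => (le_of_lt h : b ≤ a))
  have hperm := (List.perm_ext_iff_of_nodup hAnodup hBnodup).2
    (fun y => (hAmem y).trans (hBmem y).symm)
  exact hperm.eq_of_pairwise (fun a b _ _ h1 h2 => by omega) hAsorted hBsorted
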